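-- pv_equiv track=rewrite | github.com/sndb/dive-into-algorithms | ch10/dots_and_boxes.py | score
-- ===== SOURCE A (Python) =====
-- def count_squares(game):
--     return sum(
--         line[0][1] == line[1][1]
--         and [(line[0][0], line[0][1] - 1), (line[1][0], line[1][1] - 1)] in game
--         and [(line[0][0], line[0][1]), (line[1][0] - 1, line[1][1] - 1)] in game
--         and [(line[0][0] + 1, line[0][1]), (line[1][0], line[1][1] - 1)] in game
--         for line in game
--     )
--
-- def score(game):
--     result = [0, 0]
--     prev = 0
--     for i, curr in [(i, count_squares(game[: i + 1])) for i in range(len(game))]: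
--         if curr > prev:
--             result[0 if i % 2 == 0 else 1] += 1
--         prev = curr
--     return result
--
-- game = [
--     [(1, 2), (1, 1)],
--     [(3, 3), (4, 3)],
--     [(1, 5), (2, 5)],
--     [(1, 2), (2, 2)],
--     [(2, 2), (2, 1)],
--     [(1, 1), (2, 1)],
--     [(3, 4), (3, 3)],
--     [(3, 4), (4, 4)],
-- ]
-- ===== SOURCE B (Python) =====
-- def score(game):
--     # One left-to-right pass: a set of seen lines plus incremental per-move
--     # square counting, instead of recomputing count_squares on every prefix.
--     result = [0, 0]
--     seen = set()   # lines seen so far, as tuples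
--     heads = {}     # multiplicity of (line[0], line[1]) among lines so far
--     for i, line in enumerate(game):
--         full = tuple(line)
--         hd = (line[0], line[1])
--         delta = 0
--         if full not in seen:
--             seen.add(full)
--             if len(line) == 2:
--                 (p1, p2), (q1, q2) = full
--                 # the only heads whose square-condition mentions `full`
--                 for cand in (((p1, p2 + 1), (q1, q2 + 1)),
--                              ((p1, p2), (q1 + 1, q2 + 1)),
--                              ((p1 - 1, p2), (q1, q2 + 1))):
--                     if _closes(cand, seen):
--                         delta += heads.get(cand, 0)
--         if _closes(hd, seen):
--             delta += 1
--         heads[hd] = heads.get(hd, 0) + 1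
--         if delta > 0:
--             result[i % 2] += 1
--     return result
--
--
-- def _closes(hd, seen):
--     (a, b), (c, d) = hd
--     return (b == d
--             and ((a, b - 1), (c, d - 1)) in seen
--             and ((a, b), (c - 1, d - 1)) in seen
--             and ((a + 1, b), (c, d - 1)) in seen)
-- ===== Notes on version B (the rewrite author's own statement) =====
-- stated objective: faster
-- what changed: Replaces the per-prefix recomputation of count_squares (a full rescan with list-membership tests for every prefix) by a single left-to-right pass that keeps a set of seen lines and a counter of line heads and, for each new move, rechecks only the at most three squares the new line can complete.
import Mathlib
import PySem

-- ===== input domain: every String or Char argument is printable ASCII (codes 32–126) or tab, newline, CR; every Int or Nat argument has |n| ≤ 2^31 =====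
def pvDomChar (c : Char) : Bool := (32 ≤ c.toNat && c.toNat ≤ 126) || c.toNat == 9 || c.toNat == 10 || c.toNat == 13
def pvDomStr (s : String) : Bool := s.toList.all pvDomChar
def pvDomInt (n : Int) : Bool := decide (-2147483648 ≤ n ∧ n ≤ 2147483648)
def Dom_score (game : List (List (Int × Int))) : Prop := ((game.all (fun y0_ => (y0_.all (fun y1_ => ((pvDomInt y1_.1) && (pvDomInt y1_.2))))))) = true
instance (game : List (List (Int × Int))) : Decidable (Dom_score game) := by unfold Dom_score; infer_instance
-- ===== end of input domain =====

-- B replaces A's per-prefix recomputation of count_squares by one left-to-right pass with a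
-- set of seen lines and a counter of line heads (incremental per-move square counting); faster.

-- ===== PORT A =====
def count_squares (game : List (List (Int × Int))) : Int :=
  (game.map (fun line =>
    let l0 := PySem.List.pyGetD line 0 ((0 : Int), (0 : Int))
    let l1 := PySem.List.pyGetD line 1 ((0 : Int), (0 : Int))
    if (l0.2 == l1.2
        && game.contains [(l0.1, l0.2 - 1), (l1.1, l1.2 - 1)]
        && game.contains [(l0.1, l0.2), (l1.1 - 1, l1.2 - 1)]
        && game.contains [(l0.1 + 1, l0.2), (l1.1, l1.2 - 1)]) then (1 : Int) else 0)).sum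

def score (game : List (List (Int × Int))) : List Int :=
  let fin := ((PySem.List.pyRange 0 (PySem.List.len game) 1).map
      (fun i => (i, count_squares (PySem.List.slice game none (some (i + 1)))))).foldl
      (fun (st : (Int × Int) × Int) p =>
        (if p.2 > st.2 then
            (if PySem.Int.mod p.1 2 == 0 then (st.1.1 + 1, st.1.2) else (st.1.1, st.1.2 + 1))
          else st.1, p.2))
      ((0, 0), 0)
  [fin.1.1, fin.1.2]

-- ===== PORT B =====
-- Source B's helper _closes(hd, seen)
def score_closes (hd : (Int × Int) × (Int × Int)) (seen : PySem.Set (List (Int × Int))) : Bool :=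
  hd.1.2 == hd.2.2
  && PySem.Set.contains seen [(hd.1.1, hd.1.2 - 1), (hd.2.1, hd.2.2 - 1)]
  && PySem.Set.contains seen [(hd.1.1, hd.1.2), (hd.2.1 - 1, hd.2.2 - 1)]
  && PySem.Set.contains seen [(hd.1.1 + 1, hd.1.2), (hd.2.1, hd.2.2 - 1)]

-- Source B's loop body: state = (result, seen, heads)
def score_step
    (st : (Int × Int) × PySem.Set (List (Int × Int)) × PySem.Dict ((Int × Int) × (Int × Int)) Int)
    (p : Int × List (Int × Int)) :
    (Int × Int) × PySem.Set (List (Int × Int)) × PySem.Dict ((Int × Int) × (Int × Int)) Int :=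
  let result := st.1
  let seen := st.2.1
  let heads := st.2.2
  let i := p.1
  let line := p.2
  let hd := (PySem.List.pyGetD line 0 ((0 : Int), (0 : Int)),
             PySem.List.pyGetD line 1 ((0 : Int), (0 : Int)))
  let fresh := !(PySem.Set.contains seen line)
  let seen' := if fresh then PySem.Set.add seen line else seen
  let dCand : Int :=
    if fresh then
      match line with
      | [p1, q1] =>
          (if score_closes ((p1.1, p1.2 + 1), (q1.1, q1.2 + 1)) seen' then
              heads.getD ((p1.1, p1.2 + 1), (q1.1, q1.2 + 1)) 0 else 0)
        + (if score_closes ((p1.1, p1.2), (q1.1 + 1, q1.2 + 1)) seen' then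
              heads.getD ((p1.1, p1.2), (q1.1 + 1, q1.2 + 1)) 0 else 0)
        + (if score_closes ((p1.1 - 1, p1.2), (q1.1, q1.2 + 1)) seen' then
              heads.getD ((p1.1 - 1, p1.2), (q1.1, q1.2 + 1)) 0 else 0)
      | _ => 0
    else 0
  let delta : Int := dCand + (if score_closes hd seen' then 1 else 0)
  let heads' := heads.insert hd (heads.getD hd 0 + 1)
  let result' := if delta > 0 then
      (if PySem.Int.mod i 2 == 0 then (result.1 + 1, result.2) else (result.1, result.2 + 1))
    else result
  (result', seen', heads')

def score_alt (game : List (List (Int × Int))) : List Int :=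
  let fin := (PySem.List.enumerate game 0).foldl score_step
      ((0, 0), PySem.Set.empty, PySem.Dict.empty)
  [fin.1.1, fin.1.2]

-- fold machinery

-- ===== PRECONDITION & SPEC =====
-- Pre_ excludes exactly the games containing a line of fewer than two points: there the
-- Python A raises IndexError on line[1] (and Source B raises the same way).
def Pre_score (game : List (List (Int × Int))) : Prop := ∀ line ∈ game, 2 ≤ line.length
instance (game : List (List (Int × Int))) : Decidable (Pre_score game) := by unfold Pre_score; infer_instance

def pvWitness_score : (List (List (Int × Int))) :=
  [[(1, 2), (1, 1)], [(1, 2), (2, 2)], [(2, 2), (2, 1)], [(1, 1), (2, 1)]]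

def Spec_score (game : List (List (Int × Int))) (out : List Int) : Prop := out = score_alt game
instance (game : List (List (Int × Int))) (out : List Int) : Decidable (Spec_score game out) := by unfold Spec_score; infer_instance

-- ===== CLAIM (what is proved, stated in full; the proofs are below) =====
def Claim_equal_score : Prop := ∀ (game : List (List (Int × Int))), Dom_score game → Pre_score game → Spec_score game (score game)

-- ===== LEMMAS AND PROOFS =====
-- shared proof-side vocabulary: the head of a line, the three neighbour lines of a head,
-- the square predicate on a plain list, the candidate heads a new line can complete,
-- head multiplicities, and the per-move increment deltaOf
def hdL (line : List (Int × Int)) : (Int × Int) × (Int × Int) :=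
  (PySem.List.pyGetD line 0 ((0 : Int), (0 : Int)), PySem.List.pyGetD line 1 ((0 : Int), (0 : Int)))

def nb1 (h : (Int × Int) × (Int × Int)) : List (Int × Int) := [(h.1.1, h.1.2 - 1), (h.2.1, h.2.2 - 1)]

def nb2 (h : (Int × Int) × (Int × Int)) : List (Int × Int) := [(h.1.1, h.1.2), (h.2.1 - 1, h.2.2 - 1)]

def nb3 (h : (Int × Int) × (Int × Int)) : List (Int × Int) := [(h.1.1 + 1, h.1.2), (h.2.1, h.2.2 - 1)]

def closesL (h : (Int × Int) × (Int × Int)) (G : List (List (Int × Int))) : Bool :=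
  h.1.2 == h.2.2 && G.contains (nb1 h) && G.contains (nb2 h) && G.contains (nb3 h)

def cand1 (p q : Int × Int) : (Int × Int) × (Int × Int) := ((p.1, p.2 + 1), (q.1, q.2 + 1))

def cand2 (p q : Int × Int) : (Int × Int) × (Int × Int) := ((p.1, p.2), (q.1 + 1, q.2 + 1))

def cand3 (p q : Int × Int) : (Int × Int) × (Int × Int) := ((p.1 - 1, p.2), (q.1, q.2 + 1))

lemma nb1_eq_iff (h : (Int × Int) × (Int × Int)) (p q : Int × Int) :
    nb1 h = [p, q] ↔ h = cand1 p q := by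
  obtain ⟨⟨a,b⟩,⟨c,d⟩⟩ := h; obtain ⟨p1,p2⟩ := p; obtain ⟨q1,q2⟩ := q
  simp [nb1, cand1, Prod.ext_iff]; omega

lemma nb2_eq_iff (h : (Int × Int) × (Int × Int)) (p q : Int × Int) :
    nb2 h = [p, q] ↔ h = cand2 p q := by
  obtain ⟨⟨a,b⟩,⟨c,d⟩⟩ := h; obtain ⟨p1,p2⟩ := p; obtain ⟨q1,q2⟩ := q
  simp [nb2, cand2, Prod.ext_iff]; omega

lemma nb3_eq_iff (h : (Int × Int) × (Int × Int)) (p q : Int × Int) :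
    nb3 h = [p, q] ↔ h = cand3 p q := by
  obtain ⟨⟨a,b⟩,⟨c,d⟩⟩ := h; obtain ⟨p1,p2⟩ := p; obtain ⟨q1,q2⟩ := q
  simp [nb3, cand3, Prod.ext_iff]; omega

lemma cand12 (p q : Int × Int) : cand1 p q ≠ cand2 p q := by
  simp [cand1, cand2, Prod.ext_iff]

lemma cand13 (p q : Int × Int) : cand1 p q ≠ cand3 p q := by
  simp [cand1, cand3, Prod.ext_iff]

lemma cand23 (p q : Int × Int) : cand2 p q ≠ cand3 p q := by
  simp [cand2, cand3, Prod.ext_iff]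

-- contains transfer when x-lengths rule out L, or mem

lemma contains_app_ne (P : List (List (Int×Int))) (L x : List (Int×Int)) (h : x ≠ L) :
    (P ++ [L]).contains x = P.contains x := by
  simp [List.contains_eq_mem, h]

lemma contains_app_mem (P : List (List (Int×Int))) (L : List (Int×Int)) (h : L ∈ P)
    (x : List (Int×Int)) : (P ++ [L]).contains x = P.contains x := by
  simp [List.contains_eq_mem]; intro hx; subst hx; simpa using h

lemma closes_app_mem (P : List (List (Int×Int))) (L : List (Int×Int)) (h : L ∈ P)
    (c : (Int × Int) × (Int × Int)) : closesL c (P ++ [L]) = closesL c P := by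
  simp only [closesL, contains_app_mem P L h]

-- when L is not a 2-element list, no nb can equal it

lemma closes_app_nlen (P : List (List (Int×Int))) (L : List (Int×Int)) (h : L.length ≠ 2)
    (c : (Int × Int) × (Int × Int)) : closesL c (P ++ [L]) = closesL c P := by
  have h1 : nb1 c ≠ L := fun e => h (by rw [← e]; rfl)
  have h2 : nb2 c ≠ L := fun e => h (by rw [← e]; rfl)
  have h3 : nb3 c ≠ L := fun e => h (by rw [← e]; rfl)
  simp only [closesL, contains_app_ne _ _ _ h1, contains_app_ne _ _ _ h2, contains_app_ne _ _ _ h3]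

lemma closes_cand1_false (P : List (List (Int×Int))) (p q : Int × Int) (hc : [p,q] ∉ P) :
    closesL (cand1 p q) P = false := by
  have e1 : nb1 (cand1 p q) = [p,q] := (nb1_eq_iff _ p q).mpr rfl
  simp [closesL, e1, List.contains_eq_mem, hc]

lemma closes_cand2_false (P : List (List (Int×Int))) (p q : Int × Int) (hc : [p,q] ∉ P) :
    closesL (cand2 p q) P = false := by
  have e2 : nb2 (cand2 p q) = [p,q] := (nb2_eq_iff _ p q).mpr rfl
  simp [closesL, e2, List.contains_eq_mem, hc]

lemma closes_cand3_false (P : List (List (Int×Int))) (p q : Int × Int) (hc : [p,q] ∉ P) :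
    closesL (cand3 p q) P = false := by
  have e3 : nb3 (cand3 p q) = [p,q] := (nb3_eq_iff _ p q).mpr rfl
  simp [closesL, e3, List.contains_eq_mem, hc]

-- pointwise flip lemma, L = [p,q] fresh

lemma flip_point (P : List (List (Int×Int))) (p q : Int × Int) (hc : [p,q] ∉ P)
    (h : (Int × Int) × (Int × Int)) :
    (if closesL h (P ++ [[p,q]]) then (1:Int) else 0)
    = (if closesL h P then (1:Int) else 0)
      + ((if h = cand1 p q ∧ closesL (cand1 p q) (P ++ [[p,q]]) = true then (1:Int) else 0)
      + (if h = cand2 p q ∧ closesL (cand2 p q) (P ++ [[p,q]]) = true then (1:Int) else 0)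
      + (if h = cand3 p q ∧ closesL (cand3 p q) (P ++ [[p,q]]) = true then (1:Int) else 0)) := by
  by_cases h1 : h = cand1 p q
  · subst h1
    simp [closes_cand1_false P p q hc, cand12 p q, cand13 p q]
  · by_cases h2 : h = cand2 p q
    · subst h2
      simp [closes_cand2_false P p q hc, (cand12 p q).symm, cand23 p q]
    · by_cases h3 : h = cand3 p q
      · subst h3
        simp [closes_cand3_false P p q hc, h1, h2]
      · have n1 : nb1 h ≠ [p,q] := fun e => h1 ((nb1_eq_iff h p q).mp e)
        have n2 : nb2 h ≠ [p,q] := fun e => h2 ((nb2_eq_iff h p q).mp e)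
        have n3 : nb3 h ≠ [p,q] := fun e => h3 ((nb3_eq_iff h p q).mp e)
        have e : closesL h (P ++ [[p,q]]) = closesL h P := by
          simp only [closesL, contains_app_ne _ _ _ n1, contains_app_ne _ _ _ n2,
            contains_app_ne _ _ _ n3]
        simp [e, h1, h2, h3]

def cntHd (P : List (List (Int × Int))) (c : (Int × Int) × (Int × Int)) : Int :=
  ((P.countP (fun m => hdL m == c) : Nat) : Int)

def candPart (P : List (List (Int × Int))) (L : List (Int × Int)) : Int :=
  if P.contains L then 0 else
    match L with
    | [p, q] =>
        (if closesL (cand1 p q) (P ++ [L]) then cntHd P (cand1 p q) else 0)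
      + (if closesL (cand2 p q) (P ++ [L]) then cntHd P (cand2 p q) else 0)
      + (if closesL (cand3 p q) (P ++ [L]) then cntHd P (cand3 p q) else 0)
    | _ => 0

def deltaOf (P : List (List (Int × Int))) (L : List (Int × Int)) : Int :=
  candPart P L + (if closesL (hdL L) (P ++ [L]) then 1 else 0)

lemma count_squares_eq (G : List (List (Int × Int))) :
    count_squares G = (G.map (fun m => if closesL (hdL m) G then (1 : Int) else 0)).sum := rfl

lemma sum_ind (P : List (List (Int × Int))) (c : (Int × Int) × (Int × Int)) (b : Bool) :
    (P.map (fun m => if hdL m = c ∧ b = true then (1:Int) else 0)).sum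
      = if b then cntHd P c else 0 := by
  induction P with
  | nil => by_cases hb : b <;> simp [hb, cntHd]
  | cons x xs ih =>
    by_cases hb : b <;> simp only [hb] at ih ⊢ <;> by_cases hx : hdL x = c <;>
      simp [hx, cntHd] at ih ⊢ <;> omega

lemma sum_flip (P : List (List (Int × Int))) (L : List (Int × Int)) :
    (P.map (fun m => if closesL (hdL m) (P ++ [L]) then (1:Int) else 0)).sum
      = (P.map (fun m => if closesL (hdL m) P then (1:Int) else 0)).sum + candPart P L := by
  by_cases hm : L ∈ P
  · have hc : P.contains L = true := by simp [List.contains_eq_mem, hm]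
    rw [List.map_congr_left (fun m _ => by rw [closes_app_mem P L hm])]
    simp only [candPart, hc, if_true]
    ring
  · have hc : P.contains L = false := by simp [List.contains_eq_mem, hm]
    match L with
    | [p, q] =>
      rw [List.map_congr_left (fun m _ => flip_point P p q hm (hdL m))]
      rw [List.sum_map_add, List.sum_map_add, List.sum_map_add]
      rw [sum_ind, sum_ind, sum_ind]
      simp only [candPart, hc, Bool.false_eq_true, if_false]
      try ring
    | [] =>
      rw [List.map_congr_left (fun m _ => by rw [closes_app_nlen P [] (by simp) (hdL m)])]
      simp [candPart]
    | [p] =>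
      rw [List.map_congr_left (fun m _ => by rw [closes_app_nlen P [p] (by simp) (hdL m)])]
      simp [candPart]
    | p :: q :: r :: rest =>
      rw [List.map_congr_left (fun m _ => by
        rw [closes_app_nlen P (p :: q :: r :: rest) (by simp) (hdL m)])]
      simp [candPart]

lemma cnt_append (P : List (List (Int × Int))) (L : List (Int × Int)) :
    count_squares (P ++ [L]) = count_squares P + deltaOf P L := by
  rw [count_squares_eq, count_squares_eq]
  simp only [List.map_append, List.sum_append, List.map_cons, List.map_nil, List.sum_cons,
    List.sum_nil, add_zero]
  rw [sum_flip]
  simp only [deltaOf]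
  ring

def stepA (st : (Int × Int) × Int) (p : Int × Int) : (Int × Int) × Int :=
  (if p.2 > st.2 then
      (if PySem.Int.mod p.1 2 == 0 then (st.1.1 + 1, st.1.2) else (st.1.1, st.1.2 + 1))
    else st.1, p.2)

def stepsA (G : List (List (Int × Int))) : List (Int × Int) :=
  (PySem.List.pyRange 0 (PySem.List.len G) 1).map
    (fun i => (i, count_squares (PySem.List.slice G none (some (i + 1)))))

def stA (G : List (List (Int × Int))) : (Int × Int) × Int :=
  (stepsA G).foldl stepA ((0, 0), 0)

def stB (G : List (List (Int × Int))) :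
    (Int × Int) × PySem.Set (List (Int × Int)) × PySem.Dict ((Int × Int) × (Int × Int)) Int :=
  (PySem.List.enumerate G 0).foldl score_step ((0, 0), PySem.Set.empty, PySem.Dict.empty)

lemma score_eq_stA (G : List (List (Int × Int))) : score G = [(stA G).1.1, (stA G).1.2] := rfl

lemma score_alt_eq_stB (G : List (List (Int × Int))) :
    score_alt G = [(stB G).1.1, (stB G).1.2] := rfl

lemma stepsA_append (P : List (List (Int × Int))) (L : List (Int × Int)) :
    stepsA (P ++ [L]) = stepsA P ++ [((P.length : Int), count_squares (P ++ [L]))] := by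
  unfold stepsA
  have hlen : PySem.List.len (P ++ [L]) = (P.length : Int) + 1 := by
    simp [PySem.List.len_eq]
  rw [hlen, PySem.List.pyRange_one_succ_right (by positivity), List.map_append]
  congr 1
  · rw [PySem.List.len_eq]
    apply List.map_congr_left
    intro i hi
    rw [PySem.List.mem_pyRange_one] at hi
    have h1 : PySem.List.slice (P ++ [L]) none (some (i + 1)) = (P ++ [L]).take (i+1).toNat :=
      PySem.List.slice_to _ (by omega)
    have h2 : PySem.List.slice P none (some (i + 1)) = P.take (i+1).toNat :=
      PySem.List.slice_to _ (by omega)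
    rw [h1, h2, List.take_append_of_le_length (by omega)]
  · simp only [List.map_cons, List.map_nil]
    have h1 : PySem.List.slice (P ++ [L]) none (some ((P.length : Int) + 1))
        = (P ++ [L]).take ((P.length : Int) + 1).toNat := PySem.List.slice_to _ (by positivity)
    rw [h1, List.take_of_length_le (by simp)]

lemma stA_append (P : List (List (Int × Int))) (L : List (Int × Int)) :
    stA (P ++ [L]) = stepA (stA P) ((P.length : Int), count_squares (P ++ [L])) := by
  unfold stA
  rw [stepsA_append, List.foldl_append]
  rfl

lemma stB_append (P : List (List (Int × Int))) (L : List (Int × Int)) :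
    stB (P ++ [L]) = score_step (stB P) ((P.length : Int), L) := by
  unfold stB
  rw [PySem.List.enumerate_append, List.foldl_append]
  simp [PySem.List.enumerate_cons]

lemma contains_ofList (G : List (List (Int×Int))) (x : List (Int×Int)) :
    PySem.Set.contains (PySem.Set.ofList G) x = G.contains x := by
  simp [List.contains_eq_mem, PySem.Set.mem_ofList]

lemma closes_score_eq (c : (Int × Int) × (Int × Int)) (s : PySem.Set (List (Int × Int))) :
    score_closes c s = closesL c s := by
  simp [score_closes, closesL, nb1, nb2, nb3]

lemma closes_ofList (G : List (List (Int×Int))) (c : (Int × Int) × (Int × Int)) :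
    closesL c (PySem.Set.ofList G) = closesL c G := by
  simp [closesL, List.contains_eq_mem, PySem.Set.mem_ofList]

lemma ofList_append_singleton (G : List (List (Int×Int))) (L : List (Int×Int)) :
    PySem.Set.ofList (G ++ [L]) = PySem.Set.add (PySem.Set.ofList G) L := by
  simp [PySem.Set.ofList_eq_foldl, List.foldl_append]

lemma add_of_contains (s : PySem.Set (List (Int×Int))) (x : List (Int×Int))
    (h : PySem.Set.contains s x = true) : PySem.Set.add s x = s := by
  have hm : x ∈ s := by simpa [List.contains_eq_mem] using h
  simp [PySem.Set.add, List.contains_eq_mem, hm]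

lemma cntHd_append (P : List (List (Int×Int))) (L : List (Int×Int))
    (c : (Int × Int) × (Int × Int)) :
    cntHd (P ++ [L]) c = cntHd P c + (if hdL L = c then 1 else 0) := by
  by_cases h : hdL L = c <;> simp [cntHd, List.countP_append, h]

lemma seen_step (P : List (List (Int×Int))) (L : List (Int×Int)) :
    (if !(PySem.Set.contains (PySem.Set.ofList P) L) then
        PySem.Set.add (PySem.Set.ofList P) L else PySem.Set.ofList P)
      = PySem.Set.ofList (P ++ [L]) := by
  rw [ofList_append_singleton]
  by_cases hm : L ∈ P
  · have h : PySem.Set.contains (PySem.Set.ofList P) L = true := by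
      simp [List.contains_eq_mem, PySem.Set.mem_ofList, hm]
    rw [if_neg (by simp [PySem.Set.mem_ofList, hm]), add_of_contains _ _ h]
  · rw [if_pos (by simp [PySem.Set.mem_ofList, hm])]

lemma score_step_spec (P : List (List (Int×Int))) (L : List (Int×Int)) (res : Int × Int)
    (heads : PySem.Dict ((Int × Int) × (Int × Int)) Int)
    (hheads : ∀ c, heads.getD c 0 = cntHd P c) :
    score_step (res, PySem.Set.ofList P, heads) ((P.length : Int), L)
    = ((if deltaOf P L > 0 then
          (if PySem.Int.mod (P.length : Int) 2 == 0 then (res.1 + 1, res.2) else (res.1, res.2 + 1))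
        else res),
       PySem.Set.ofList (P ++ [L]),
       heads.insert (hdL L) (heads.getD (hdL L) 0 + 1)) := by
  have hc := contains_ofList P L
  have hs := seen_step P L
  by_cases hm : P.contains L
  · rw [hm] at hc
    rw [hc] at hs
    simp only [score_step, hc, Bool.not_true, Bool.false_eq_true, if_false] at *
    rw [hs] -- no-op shape: seen' else-branch
    simp only [deltaOf, candPart, hm, if_true, closes_score_eq, closes_ofList, hdL]
    rfl
  · have hm' : P.contains L = false := eq_false_of_ne_true hm
    rw [hm'] at hc
    rw [hc] at hs
    rw [if_pos (by simp)] at hs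
    simp only [score_step, hc, Bool.not_false, if_true, hs, closes_score_eq, closes_ofList]
    simp only [deltaOf, candPart, hm', Bool.false_eq_true, if_false, hdL]
    match L with
    | [p1, q1] => simp only [hheads, cand1, cand2, cand3]; rfl
    | [] => rfl
    | [p1] => rfl
    | p1 :: q1 :: r1 :: rest => rfl

lemma main_inv (P : List (List (Int × Int))) :
    (stA P).1 = (stB P).1 ∧ (stA P).2 = count_squares P
    ∧ (stB P).2.1 = PySem.Set.ofList P
    ∧ ∀ c, ((stB P).2.2).getD c 0 = cntHd P c := by
  induction P using List.reverseRecOn with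
  | nil =>
    refine ⟨rfl, rfl, rfl, fun c => ?_⟩
    simp [stB, cntHd, PySem.Dict.getD_empty]
  | append_singleton P L ih =>
    obtain ⟨ih1, ih2, ih3, ih4⟩ := ih
    have hB : stB P = ((stB P).1, (stB P).2.1, (stB P).2.2) := rfl
    rw [stA_append, stB_append, hB, ih3]
    rw [score_step_spec P L (stB P).1 (stB P).2.2 ih4]
    have hcnt := cnt_append P L
    refine ⟨?_, ?_, rfl, fun c => ?_⟩
    · simp only [stepA, ih1, ih2, hcnt]
      simp only [gt_iff_lt, lt_add_iff_pos_right]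
    · simp [stepA, hcnt]
    · rw [PySem.Dict.getD_insert, ih4, cntHd_append]
      by_cases h : c = hdL L
      · simp [h]
      · simp [h, ih4, show hdL L ≠ c from fun e => h e.symm]

-- ===== VERDICT (by name: the statement is the Claim_ definition above) =====
theorem score_spec : Claim_equal_score := by
  intro game _ _
  unfold Spec_score
  rw [score_eq_stA, score_alt_eq_stB, (main_inv game).1]
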